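-- pv_equiv track=rewrite | github.com/JUNGEEYOU/Algorithm-Problems | binary_search/programmers/64062.py | cnt
-- ===== SOURCE A (Python) =====
-- def cnt(target, stones, k):
--     now = -1
--     next = 0
--     while next != len(stones):
--         if stones[next] >= target:   # 해당 인원인 모두 건너면
--             now = next
--             next += 1
--         else:   # 해당 인원이 못 건너면
--             next += 1
--             if next - now > k:
--                 return False
--     return True
-- ===== SOURCE B (Python) =====
-- def cnt(target, stones, k):
--     # Scan by whole runs: find each maximal run of below-target stones at once
--     # and fail iff its length reaches k.
--     i, n = 0, len(stones)
--     while i < n: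
--         if stones[i] >= target:
--             i += 1
--             continue
--         j = i
--         while j < n and stones[j] < target:
--             j += 1
--         if j - i >= k:
--             return False
--         i = j
--     return True
-- ===== Notes on version B (the rewrite author's own statement) =====
-- stated objective: alternative
-- what changed: B replaces A's two-pointer (now/next) index-difference walk by a run-skipping scan: it jumps over each maximal run of below-target stones at once and fails iff a run length reaches k.
import Mathlib
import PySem

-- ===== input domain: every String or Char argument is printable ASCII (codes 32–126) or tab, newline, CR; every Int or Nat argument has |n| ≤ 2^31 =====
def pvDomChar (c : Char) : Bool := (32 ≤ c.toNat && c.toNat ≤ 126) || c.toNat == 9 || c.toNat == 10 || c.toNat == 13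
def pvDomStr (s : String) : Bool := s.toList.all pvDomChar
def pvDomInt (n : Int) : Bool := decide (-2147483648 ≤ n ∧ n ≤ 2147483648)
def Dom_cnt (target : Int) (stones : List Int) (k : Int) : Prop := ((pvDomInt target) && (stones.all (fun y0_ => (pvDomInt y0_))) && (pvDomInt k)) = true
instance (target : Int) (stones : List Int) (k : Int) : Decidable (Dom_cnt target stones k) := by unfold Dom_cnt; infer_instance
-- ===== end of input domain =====

-- B replaces A's two-pointer index-difference walk by a run-skipping scan over maximal
-- below-target runs; same O(n) cost, different traversal shape (objective: alternative).

-- ===== PORT A =====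
-- A's while loop over indices, as structural recursion on the remaining suffix of
-- stones; 'now' and 'next' are carried exactly as in the Python.
def cntGo (target : Int) (k : Int) : List Int → Int → Int → Bool
  | [], _, _ => true
  | s :: rest, now, next =>
    if s ≥ target then
      cntGo target k rest next (next + 1)
    else
      if (next + 1) - now > k then false
      else cntGo target k rest now (next + 1)

def cnt (target : Int) (stones : List Int) (k : Int) : Bool :=
  cntGo target k stones (-1) 0

-- ===== PORT B =====
-- B's outer loop: each step either skips one ≥ target stone, or consumes the whole
-- maximal below-target run (B's inner 'while j < n and stones[j] < target' loop is
-- takeWhile/dropWhile of that predicate) and checks its length against k.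
def cntAltGo (target : Int) (k : Int) : List Int → Bool
  | [] => true
  | s :: rest =>
    if s < target then
      let run := List.takeWhile (fun x => decide (x < target)) (s :: rest)
      if (run.length : Int) ≥ k then false
      else cntAltGo target k (List.dropWhile (fun x => decide (x < target)) (s :: rest))
    else cntAltGo target k rest
  termination_by l => l.length
  decreasing_by
    · simp only [List.dropWhile]
      simp_all
      exact List.length_dropWhile_le _ _
    · simp

def cnt_alt (target : Int) (stones : List Int) (k : Int) : Bool :=
  cntAltGo target k stones

-- ===== PRECONDITION & SPEC =====
def Spec_cnt (target : Int) (stones : List Int) (k : Int) (out : Bool) : Prop := out = cnt_alt target stones k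
instance (target : Int) (stones : List Int) (k : Int) (out : Bool) : Decidable (Spec_cnt target stones k out) := by unfold Spec_cnt; infer_instance

-- ===== CLAIM (what is proved, stated in full; the proofs are below) =====
def Claim_equal_cnt : Prop := ∀ (target : Int) (stones : List Int) (k : Int), Dom_cnt target stones k → Spec_cnt target stones k (cnt target stones k)

-- ===== LEMMAS AND PROOFS =====

-- A's loop depends on now/next only through their difference: shifting both is invisible.
theorem cntGo_shift (target k : Int) (l : List Int) :
    ∀ now next c, cntGo target k l (now + c) (next + c) = cntGo target k l now next := by
  induction l with
  | nil => intro now next c; rfl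
  | cons s rest ih =>
    intro now next c
    simp only [cntGo]
    by_cases h : s ≥ target
    · simp only [h, if_pos]
      have := ih next (next + 1) c
      simpa [add_assoc, add_comm, add_left_comm] using this
    · simp only [h, if_false]
      have hc : (next + c + 1) - (now + c) = (next + 1) - now := by ring
      rw [hc]
      by_cases hk : (next + 1) - now > k
      · simp [hk]
      · have := ih now (next + 1) c
        simp only [hk, if_false]
        simpa [add_assoc, add_comm, add_left_comm] using this

-- Consuming a nonempty all-below run from state (-d, 0): the loop fails iff
-- d + run-length exceeds k, otherwise proceeds with the difference increased.
theorem cntGo_run (target k : Int) :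
    ∀ (t : List Int), t ≠ [] → (∀ x ∈ t, x < target) → ∀ (d : Int) (r : List Int),
      cntGo target k (t ++ r) (-d) 0 =
        if d + (t.length : Int) > k then false
        else cntGo target k r (-(d + (t.length : Int))) 0 := by
  intro t
  induction t with
  | nil => intro h; exact absurd rfl h
  | cons a t' ih =>
    intro _ hall d r
    have ha : a < target := hall a (List.mem_cons_self ..)
    have ha' : ¬ a ≥ target := by omega
    simp only [List.cons_append, cntGo, ha', if_neg, if_false]
    have hsub : (0 : Int) + 1 - (-d) = d + 1 := by ring
    rw [hsub]
    rcases eq_or_ne t' [] with h0 | h0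
    · subst h0
      by_cases hk : d + 1 > k
      · simp [hk]
      · have hsh := cntGo_shift target k r (-(d + 1)) 0 1
        have he : -(d + 1) + 1 = -d := by ring
        rw [he] at hsh
        have hk2 : ¬ d + (([] : List Int).length + 1 : ℕ) > k := by
          simp only [List.length_nil]; push_cast; omega
        simp only [List.nil_append, List.length_cons, hk, if_false, hk2]
        rw [hsh]
        norm_num
    · have hall' : ∀ x ∈ t', x < target := fun x hx => hall x (List.mem_cons_of_mem _ hx)
      by_cases hk : d + 1 > k
      · have hk2 : d + ((t'.length : Int) + 1) > k := by
          have : (0 : Int) ≤ (t'.length : Int) := Int.natCast_nonneg _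
          omega
        simp only [hk, if_pos, List.length_cons]
        push_cast
        rw [if_pos (by push_cast; omega)]
      · simp only [hk, if_false]
        have hsh := cntGo_shift target k (t' ++ r) (-(d+1)) 0 1
        have h2 : -(d+1) + 1 = -d := by ring
        rw [h2] at hsh
        rw [hsh, ih h0 hall' (d + 1) r]
        simp only [List.length_cons]
        by_cases hk2 : d + 1 + (t'.length : Int) > k
        · rw [if_pos hk2, if_pos (by push_cast; omega)]
        · rw [if_neg hk2, if_neg (by push_cast; omega)]
          congr 1
          push_cast; ring

-- the head of a nonempty dropWhile fails the predicate
theorem dropWhile_head_false {α : Type} (p : α → Bool) :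
    ∀ (l : List α) (h : α) (r : List α), List.dropWhile p l = h :: r → p h = false := by
  intro l
  induction l with
  | nil => intro h r hc; simp [List.dropWhile] at hc
  | cons a l ih =>
    intro h r hc
    by_cases hpa : p a
    · rw [List.dropWhile_cons_of_pos hpa] at hc
      exact ih h r hc
    · rw [List.dropWhile_cons_of_neg hpa] at hc
      cases hc
      simpa using hpa

theorem cntGo_eq_altGo (target k : Int) :
    ∀ (n : Nat) (l : List Int), l.length ≤ n →
      cntGo target k l (-1) 0 = cntAltGo target k l := by
  intro n
  induction n with
  | zero =>
    intro l hl
    have : l = [] := List.eq_nil_of_length_eq_zero (Nat.le_zero.mp hl)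
    subst this; simp [cntGo, cntAltGo]
  | succ m ih =>
    intro l hl
    match l with
    | [] => simp [cntGo, cntAltGo]
    | s :: rest =>
      by_cases hs : s < target
      · -- below-target head: B consumes the whole maximal run at once
        have hs' : ¬ s ≥ target := by omega
        obtain ⟨t, ht⟩ : ∃ t, List.takeWhile (fun x : Int => decide (x < target)) (s :: rest) = t := ⟨_, rfl⟩
        obtain ⟨r, hr⟩ : ∃ r, List.dropWhile (fun x : Int => decide (x < target)) (s :: rest) = r := ⟨_, rfl⟩
        have hsplit : s :: rest = t ++ r := by
          rw [← ht, ← hr]; exact (List.takeWhile_append_dropWhile ..).symm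
        have htne : t ≠ [] := by rw [← ht]; simp [List.takeWhile, hs]
        have hall : ∀ x ∈ t, x < target := by
          intro x hx
          have := List.mem_takeWhile_imp (by rw [ht]; exact hx)
          simpa using this
        have hlen : t.length + r.length = rest.length + 1 := by
          have := congrArg List.length hsplit
          simp only [List.length_cons, List.length_append] at this
          omega
        have hrun := cntGo_run target k t htne hall 1 r
        conv_lhs => rw [hsplit]
        rw [hrun, cntAltGo]
        simp only [if_pos hs, ht, hr]
        by_cases hk : (t.length : Int) ≥ k
        · rw [if_pos (by omega), if_pos hk]
        · rw [if_neg (by omega), if_neg hk]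
          -- r is empty or starts with a ≥ target stone
          cases r with
          | nil => simp [cntGo, cntAltGo]
          | cons h r' =>
            have hh : (fun x : Int => decide (x < target)) h = false :=
              dropWhile_head_false (fun x : Int => decide (x < target)) (s :: rest) h r' hr
            have hhge : h ≥ target := by
              have : ¬ h < target := by simpa using hh
              omega
            rw [cntGo]
            simp only [if_pos hhge]
            have hsh := cntGo_shift target k r' (-1) 0 1
            norm_num at hsh
            rw [show (0:Int) + 1 = 1 from by norm_num, hsh]
            have hlt : r'.length ≤ m := by
              have ht1 : 0 < t.length := List.length_pos_of_ne_nil htne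
              simp only [List.length_cons] at hlen hl
              omega
            rw [ih r' hlt, cntAltGo]
            have hh' : ¬ h < target := by omega
            simp [hh']
      · -- head passes: both sides step by one
        have hs' : s ≥ target := by omega
        rw [cntGo]
        simp only [hs', if_pos]
        have hsh := cntGo_shift target k rest (-1) 0 1
        norm_num at hsh
        rw [show (0:Int) + 1 = 1 from by norm_num, hsh]
        rw [ih rest (by simpa using Nat.lt_succ_iff.mp (by simpa using hl))]
        rw [cntAltGo]
        simp [hs]

-- ===== VERDICT (by name: the statement is the Claim_ definition above) =====
theorem cnt_spec : Claim_equal_cnt := by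
  intro target stones k _
  unfold Spec_cnt cnt cnt_alt
  exact cntGo_eq_altGo target k stones.length stones le_rfl
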